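-- pv_equiv track=rewrite | github.com/DeenathayalanCK/Video-Summarizer-Querying | app/detection/attribute_extractor.py | _parse_prose_person_attrs
-- ===== SOURCE A (Python) =====
-- def _parse_prose_person_attrs(text: str) -> dict:
--     """
--     Fallback for models (e.g. moondream2) that return prose instead of JSON.
--     Extracts person attributes using keyword matching on plain-text response.
--     Returns partial dict — missing keys stay "unknown" in the caller.
--     """
--     if not text:
--         return {}
--     t = text.lower()
--     result = {}
--     import re as _re
--
--     if any(w in t for w in [" male", " man ", "boy", " his "]):
--         result["gender_estimate"] = "male"
--     elif any(w in t for w in [" female", " woman ", "girl", " her "]):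
--         result["gender_estimate"] = "female"
--
--     if any(w in t for w in ["child", " kid "]):
--         result["age_estimate"] = "child"
--     elif "teen" in t:
--         result["age_estimate"] = "teenager"
--     elif "young adult" in t or "young man" in t or "young woman" in t:
--         result["age_estimate"] = "young adult"
--     elif any(w in t for w in ["senior", "elderly", "older person"]):
--         result["age_estimate"] = "senior"
--     elif "adult" in t:
--         result["age_estimate"] = "adult"
--
--     colors = ["black", "white", "red", "blue", "green", "yellow",
--               "grey", "gray", "brown", "orange", "purple", "pink",
--               "navy", "dark blue", "light blue", "dark", "light"]
--     top_garments    = ["jacket", "shirt", "hoodie", "sweater", "t-shirt",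
--                        "coat", "blazer", "top", "blouse", "vest", "jumper"]
--     bottom_garments = ["jeans", "trousers", "pants", "shorts", "skirt", "leggings"]
--
--     for color in colors:
--         for garment in top_garments:
--             if color in t and garment in t:
--                 result["clothing_top"] = f"{color} {garment}"
--                 break
--         if "clothing_top" in result:
--             break
--
--     for color in colors:
--         for garment in bottom_garments:
--             if color in t and garment in t:
--                 result["clothing_bottom"] = f"{color} {garment}"
--                 break
--         if "clothing_bottom" in result:
--             break
--
--     for word in ["hat", "cap", "helmet", "hood", "beanie", "turban", "hijab"]:
--         if word in t:
--             result["head_covering"] = word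
--             break
--
--     for word in ["backpack", "bag", "handbag", "briefcase",
--                  "luggage", "suitcase", "box", "package"]:
--         if word in t:
--             result["carrying"] = word
--             break
--
--     return result
-- ===== SOURCE B (Python) =====
-- # B: data-driven tables + independent presence scans instead of nested loops / if-elif chains.
-- _GENDER_RULES = [("male", [" male", " man ", "boy", " his "]),
--                  ("female", [" female", " woman ", "girl", " her "])]
-- _AGE_RULES = [("child", ["child", " kid "]),
--               ("teenager", ["teen"]),
--               ("young adult", ["young adult", "young man", "young woman"]),
--               ("senior", ["senior", "elderly", "older person"]),
--               ("adult", ["adult"])]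
-- _COLORS = ["black", "white", "red", "blue", "green", "yellow",
--            "grey", "gray", "brown", "orange", "purple", "pink",
--            "navy", "dark blue", "light blue", "dark", "light"]
-- _TOPS = ["jacket", "shirt", "hoodie", "sweater", "t-shirt",
--          "coat", "blazer", "top", "blouse", "vest", "jumper"]
-- _BOTTOMS = ["jeans", "trousers", "pants", "shorts", "skirt", "leggings"]
-- _HEADS = ["hat", "cap", "helmet", "hood", "beanie", "turban", "hijab"]
-- _CARRY = ["backpack", "bag", "handbag", "briefcase",
--           "luggage", "suitcase", "box", "package"]
--
--
-- def _parse_prose_person_attrs(text: str) -> dict: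
--     if not text:
--         return {}
--     t = text.lower()
--
--     def first_hit(rules):
--         return next((v for v, kws in rules if any(k in t for k in kws)), None)
--
--     def first_present(words):
--         return next((w for w in words if w in t), None)
--
--     result = {}
--     g = first_hit(_GENDER_RULES)
--     if g is not None:
--         result["gender_estimate"] = g
--     a = first_hit(_AGE_RULES)
--     if a is not None:
--         result["age_estimate"] = a
--     color = first_present(_COLORS)
--     top = first_present(_TOPS)
--     bottom = first_present(_BOTTOMS)
--     if color is not None and top is not None:
--         result["clothing_top"] = f"{color} {top}"
--     if color is not None and bottom is not None:
--         result["clothing_bottom"] = f"{color} {bottom}"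
--     head = first_present(_HEADS)
--     if head is not None:
--         result["head_covering"] = head
--     carry = first_present(_CARRY)
--     if carry is not None:
--         result["carrying"] = carry
--     return result
-- ===== Notes on version B (the rewrite author's own statement) =====
-- stated objective: simpler
-- what changed: Replaces A's nested color-by-garment loops with independent first-present scans of the color and garment lists combined afterwards, and the if/elif keyword chains with data-driven rule tables scanned for the first hit.
import Mathlib
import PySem

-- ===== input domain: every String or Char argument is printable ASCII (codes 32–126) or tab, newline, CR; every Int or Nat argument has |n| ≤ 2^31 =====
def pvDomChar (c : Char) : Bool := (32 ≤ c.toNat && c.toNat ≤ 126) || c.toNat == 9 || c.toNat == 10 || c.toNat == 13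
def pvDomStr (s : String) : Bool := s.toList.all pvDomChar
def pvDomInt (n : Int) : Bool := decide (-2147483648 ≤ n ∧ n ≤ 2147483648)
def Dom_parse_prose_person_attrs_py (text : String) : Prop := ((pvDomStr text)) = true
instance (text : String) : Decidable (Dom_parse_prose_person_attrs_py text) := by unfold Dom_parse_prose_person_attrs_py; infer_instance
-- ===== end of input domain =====

-- B replaces A's nested color×garment loops by independent first-present scans combined afterwards,
-- and the if/elif keyword chains by data-driven rule tables (objective: simpler); return values identical.

-- ===== PORT A =====

-- inner 'for garment in …: if color in t and garment in t: … break'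
def pvInnerA (t color : String) : List String → Option String
  | [] => none
  | g :: gs =>
      if PySem.Str.isIn color t && PySem.Str.isIn g t then some (color ++ " " ++ g)
      else pvInnerA t color gs

-- outer 'for color in colors: …; if key in result: break'
def pvOuterA (t : String) (garments : List String) : List String → Option String
  | [] => none
  | c :: cs =>
      match pvInnerA t c garments with
      | some r => some r
      | none => pvOuterA t garments cs

-- 'for word in …: if word in t: … break'
def pvFirstWordA (t : String) : List String → Option String
  | [] => none
  | w :: ws => if PySem.Str.isIn w t then some w else pvFirstWordA t ws

def parse_prose_person_attrs_py (text : String) : List (String × String) :=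
  if text == "" then []
  else
    let t := PySem.Str.lower text
    let result : List (String × String) := []
    let result :=
      if [" male", " man ", "boy", " his "].any (fun w => PySem.Str.isIn w t) then
        result ++ [("gender_estimate", "male")]
      else if [" female", " woman ", "girl", " her "].any (fun w => PySem.Str.isIn w t) then
        result ++ [("gender_estimate", "female")]
      else result
    let result :=
      if ["child", " kid "].any (fun w => PySem.Str.isIn w t) then
        result ++ [("age_estimate", "child")]
      else if PySem.Str.isIn "teen" t then result ++ [("age_estimate", "teenager")]
      else if PySem.Str.isIn "young adult" t || PySem.Str.isIn "young man" t
          || PySem.Str.isIn "young woman" t then result ++ [("age_estimate", "young adult")]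
      else if ["senior", "elderly", "older person"].any (fun w => PySem.Str.isIn w t) then
        result ++ [("age_estimate", "senior")]
      else if PySem.Str.isIn "adult" t then result ++ [("age_estimate", "adult")]
      else result
    let colors := ["black", "white", "red", "blue", "green", "yellow",
                   "grey", "gray", "brown", "orange", "purple", "pink",
                   "navy", "dark blue", "light blue", "dark", "light"]
    let top_garments := ["jacket", "shirt", "hoodie", "sweater", "t-shirt",
                         "coat", "blazer", "top", "blouse", "vest", "jumper"]
    let bottom_garments := ["jeans", "trousers", "pants", "shorts", "skirt", "leggings"]
    let result :=
      match pvOuterA t top_garments colors with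
      | some r => result ++ [("clothing_top", r)]
      | none => result
    let result :=
      match pvOuterA t bottom_garments colors with
      | some r => result ++ [("clothing_bottom", r)]
      | none => result
    let result :=
      match pvFirstWordA t ["hat", "cap", "helmet", "hood", "beanie", "turban", "hijab"] with
      | some w => result ++ [("head_covering", w)]
      | none => result
    let result :=
      match pvFirstWordA t ["backpack", "bag", "handbag", "briefcase",
                            "luggage", "suitcase", "box", "package"] with
      | some w => result ++ [("carrying", w)]
      | none => result
    result

-- ===== PORT B =====

-- first rule whose keyword list has a hit in t
def pvFirstHitB (t : String) : List (String × List String) → Option String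
  | [] => none
  | (v, kws) :: rest =>
      if kws.any (fun k => PySem.Str.isIn k t) then some v else pvFirstHitB t rest

-- first word of the list present in t
def pvFirstPresentB (t : String) (words : List String) : Option String :=
  words.find? (fun w => PySem.Str.isIn w t)

def pvAddOptB (result : List (String × String)) (key : String) :
    Option String → List (String × String)
  | some v => result ++ [(key, v)]
  | none => result

def parse_prose_person_attrs_py_alt (text : String) : List (String × String) :=
  if text == "" then []
  else
    let t := PySem.Str.lower text
    let result := pvAddOptB [] "gender_estimate"
      (pvFirstHitB t [("male", [" male", " man ", "boy", " his "]),
                      ("female", [" female", " woman ", "girl", " her "])])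
    let result := pvAddOptB result "age_estimate"
      (pvFirstHitB t [("child", ["child", " kid "]),
                      ("teenager", ["teen"]),
                      ("young adult", ["young adult", "young man", "young woman"]),
                      ("senior", ["senior", "elderly", "older person"]),
                      ("adult", ["adult"])])
    let color := pvFirstPresentB t ["black", "white", "red", "blue", "green", "yellow",
                                    "grey", "gray", "brown", "orange", "purple", "pink",
                                    "navy", "dark blue", "light blue", "dark", "light"]
    let top := pvFirstPresentB t ["jacket", "shirt", "hoodie", "sweater", "t-shirt",
                                  "coat", "blazer", "top", "blouse", "vest", "jumper"]
    let bottom := pvFirstPresentB t ["jeans", "trousers", "pants", "shorts", "skirt", "leggings"]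
    let result :=
      match color, top with
      | some c, some g => result ++ [("clothing_top", c ++ " " ++ g)]
      | _, _ => result
    let result :=
      match color, bottom with
      | some c, some g => result ++ [("clothing_bottom", c ++ " " ++ g)]
      | _, _ => result
    let result := pvAddOptB result "head_covering"
      (pvFirstPresentB t ["hat", "cap", "helmet", "hood", "beanie", "turban", "hijab"])
    let result := pvAddOptB result "carrying"
      (pvFirstPresentB t ["backpack", "bag", "handbag", "briefcase",
                          "luggage", "suitcase", "box", "package"])
    result

-- ===== PRECONDITION & SPEC =====
def Spec_parse_prose_person_attrs_py (text : String) (out : List (String × String)) : Prop := out = parse_prose_person_attrs_py_alt text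
instance (text : String) (out : List (String × String)) : Decidable (Spec_parse_prose_person_attrs_py text out) := by unfold Spec_parse_prose_person_attrs_py; infer_instance

-- ===== CLAIM (what is proved, stated in full; the proofs are below) =====
def Claim_equal_parse_prose_person_attrs_py : Prop := ∀ (text : String), Dom_parse_prose_person_attrs_py text → Spec_parse_prose_person_attrs_py text (parse_prose_person_attrs_py text)

-- ===== LEMMAS AND PROOFS =====

theorem pvInnerA_eq (t color : String) (gs : List String) :
    pvInnerA t color gs =
      if PySem.Str.isIn color t then
        (gs.find? (fun g => PySem.Str.isIn g t)).map (fun g => color ++ " " ++ g)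
      else none := by
  induction gs with
  | nil => cases hc : PySem.Str.isIn color t <;> simp only [pvInnerA, List.find?] <;> rfl
  | cons g gs ih =>
      simp only [pvInnerA, List.find?, ih]
      cases hc : PySem.Str.isIn color t <;> cases hg : PySem.Str.isIn g t <;> rfl

theorem pvOuterA_eq (t : String) (garments colors : List String) :
    pvOuterA t garments colors =
      match colors.find? (fun w => PySem.Str.isIn w t),
            garments.find? (fun w => PySem.Str.isIn w t) with
      | some c, some g => some (c ++ " " ++ g)
      | _, _ => none := by
  induction colors with
  | nil => cases garments.find? (fun w => PySem.Str.isIn w t) <;> rfl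
  | cons c cs ih =>
      simp only [pvOuterA, pvInnerA_eq, List.find?, ih]
      cases hc : PySem.Str.isIn c t
      · rfl
      · cases hg : garments.find? (fun w => PySem.Str.isIn w t) with
        | none => cases cs.find? (fun w => PySem.Str.isIn w t) <;> rfl
        | some g => rfl

theorem pvFirstWordA_eq (t : String) (ws : List String) :
    pvFirstWordA t ws = ws.find? (fun w => PySem.Str.isIn w t) := by
  induction ws with
  | nil => rfl
  | cons w ws ih =>
      simp only [pvFirstWordA, List.find?, ih]
      cases h : PySem.Str.isIn w t <;> rfl

theorem pvAddOptB_if (res : List (String × String)) (key : String) (c : Bool) (v : String)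
    (o : Option String) :
    pvAddOptB res key (if c = true then some v else o) =
      if c = true then res ++ [(key, v)] else pvAddOptB res key o := by
  cases c <;> rfl

theorem pvAddOptB_none (res : List (String × String)) (key : String) :
    pvAddOptB res key none = res := rfl

theorem pvClothMatch (res : List (String × String)) (key : String) (co go : Option String) :
    (match (match co, go with
            | some c, some g => some (c ++ " " ++ g)
            | _, _ => none) with
     | some r => res ++ [(key, r)]
     | none => res) =
      match co, go with
      | some c, some g => res ++ [(key, c ++ " " ++ g)]
      | _, _ => res := by
  cases co <;> cases go <;> rfl

-- ===== VERDICT (by name: the statement is the Claim_ definition above) =====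
theorem parse_prose_person_attrs_py_spec : Claim_equal_parse_prose_person_attrs_py := by
  intro text _
  unfold Spec_parse_prose_person_attrs_py parse_prose_person_attrs_py parse_prose_person_attrs_py_alt
  by_cases he : (text == "") = true
  · rw [if_pos he, if_pos he]
  · rw [if_neg he, if_neg he]
    simp only [pvOuterA_eq, pvFirstWordA_eq, pvFirstHitB, pvFirstPresentB,
      pvAddOptB_if, pvAddOptB_none, pvClothMatch,
      List.any_cons, List.any_nil, Bool.or_false, Bool.or_assoc]
    rfl
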